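-- pv_equiv track=rewrite | github.com/kjihens/tftag-pipeline | src/tftag/design.py | _count_trailing_gc
-- ===== SOURCE A (Python) =====
-- def _count_trailing_gc(primer: str) -> int:
--     """Count consecutive G/C bases from the 3' end of a primer."""
--     c = 0
--     for b in reversed(primer.upper()):
--         if b in ("G", "C"):
--             c += 1
--         else:
--             break
--     return c
-- ===== SOURCE B (Python) =====
-- def _count_trailing_gc(primer: str) -> int:
--     """Count consecutive G/C bases from the 3' end of a primer."""
--     up = primer.upper()
--     return len(up) - len(up.rstrip("GC"))
-- ===== Notes on version B (the rewrite author's own statement) =====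
-- stated objective: idiomatic
-- what changed: Replaces the explicit reversed-iteration loop with break by stripping trailing G/C characters via rstrip and taking the length difference.
import Mathlib
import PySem

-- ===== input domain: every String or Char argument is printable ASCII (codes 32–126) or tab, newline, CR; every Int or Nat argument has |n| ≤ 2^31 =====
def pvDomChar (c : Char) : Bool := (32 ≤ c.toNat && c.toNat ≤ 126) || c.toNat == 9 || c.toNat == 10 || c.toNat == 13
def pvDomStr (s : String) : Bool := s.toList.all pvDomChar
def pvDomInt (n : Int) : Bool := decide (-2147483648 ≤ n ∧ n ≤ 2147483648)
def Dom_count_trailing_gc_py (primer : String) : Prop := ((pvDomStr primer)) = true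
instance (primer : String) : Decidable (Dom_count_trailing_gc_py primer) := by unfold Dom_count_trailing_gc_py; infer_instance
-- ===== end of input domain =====

-- B computes the trailing-G/C count via rstrip("GC") and a length difference instead of A's reversed loop with break (idiomatic rewrite, same cost).


-- ===== PORT A =====
-- the 'for b in reversed(...): if ...: c += 1 else: break' loop, state = the counter c
def gcLoopA : List Char → Int → Int
  | [], c => c
  | b :: rest, c => if b == 'G' || b == 'C' then gcLoopA rest (c + 1) else c

def count_trailing_gc_py (primer : String) : Int :=
  gcLoopA ((PySem.Str.upper primer).toList.reverse) 0

-- ===== PORT B =====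
-- rstrip("GC") has no PySem primitive; ported by hand (drop matching chars from the right), exact on this ASCII char set
def rstripGC (l : List Char) : List Char :=
  (l.reverse.dropWhile (fun c => c == 'G' || c == 'C')).reverse

def count_trailing_gc_py_alt (primer : String) : Int :=
  let up := (PySem.Str.upper primer).toList
  (up.length : Int) - (rstripGC up).length

-- ===== PRECONDITION & SPEC =====
def Spec_count_trailing_gc_py (primer : String) (out : Int) : Prop := out = count_trailing_gc_py_alt primer
instance (primer : String) (out : Int) : Decidable (Spec_count_trailing_gc_py primer out) := by unfold Spec_count_trailing_gc_py; infer_instance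

-- ===== CLAIM (what is proved, stated in full; the proofs are below) =====
def Claim_equal_count_trailing_gc_py : Prop := ∀ (primer : String), Dom_count_trailing_gc_py primer → Spec_count_trailing_gc_py primer (count_trailing_gc_py primer)

-- ===== LEMMAS AND PROOFS =====

theorem gcLoopA_eq_takeWhile (l : List Char) (c : Int) :
    gcLoopA l c = c + (l.takeWhile (fun b => b == 'G' || b == 'C')).length := by
  induction l generalizing c with
  | nil => simp [gcLoopA]
  | cons b rest ih =>
    by_cases h : (b == 'G' || b == 'C') = true
    · simp [gcLoopA, h, ih]; ring
    · simp [gcLoopA, h]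

theorem len_sub_rstripGC (l : List Char) :
    (l.length : Int) - (rstripGC l).length
      = (l.reverse.takeWhile (fun b => b == 'G' || b == 'C')).length := by
  unfold rstripGC
  have h := List.takeWhile_append_dropWhile (p := fun b => b == 'G' || b == 'C') (l := l.reverse)
  have hlen := congrArg List.length h
  simp only [List.length_append] at hlen
  simp only [List.length_reverse] at hlen ⊢
  omega

-- ===== VERDICT (by name: the statement is the Claim_ definition above) =====
theorem count_trailing_gc_py_spec : Claim_equal_count_trailing_gc_py := by
  intro primer _
  unfold Spec_count_trailing_gc_py count_trailing_gc_py count_trailing_gc_py_alt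
  rw [gcLoopA_eq_takeWhile, len_sub_rstripGC]
  simp
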